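-- pv_equiv track=rewrite | github.com/santaiscoming/algorithm-workbook | 백준/Silver/2217. 로프/로프.py | solution
-- ===== SOURCE A (Python) =====
-- def solution(N, ropes):
--     result = []
--     ascendingRopes = sorted(ropes, reverse=True)
--
--     for i in range(N):
--         ropeCount = i + 1
--         weight = ascendingRopes[i] * ropeCount
--         result.append(weight)
--
--     return max(result)
-- ===== SOURCE B (Python) =====
-- def solution(N, ropes):
--     # Answer exists only when 1 <= N <= len(ropes).
--     if not (1 <= N <= len(ropes)):
--         raise ValueError("need 1 <= N <= len(ropes)")
--     # For each rope r, the achievable team sizes are its ranks among equals in the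
--     # descending order: from (#strictly heavier)+1 up to (#at least as heavy), clamped to N.
--     # r*k over that interval is maximised at an endpoint, so only two candidates per rope.
--     best = None
--     for r in ropes:
--         gt = 0
--         ge = 0
--         for x in ropes:
--             if x > r:
--                 gt += 1
--             if x >= r:
--                 ge += 1
--         k1 = min(gt + 1, N)
--         k2 = min(ge, N)
--         cand = max(r * k1, r * k2)
--         if best is None or cand > best:
--             best = cand
--     return best
-- ===== Notes on version B (the rewrite author's own statement) =====
-- stated objective: alternative
-- what changed: B removes the sort and the positional index pass: for each rope it counts how many ropes are strictly heavier / at least as heavy, which brackets the ranks that rope can occupy, and takes the better of the two endpoint products r*min(gt+1,N) and r*min(ge,N) while tracking a running maximum; B validates 1 <= N <= len(ropes) up front (exactly where A raises).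
import Mathlib
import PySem

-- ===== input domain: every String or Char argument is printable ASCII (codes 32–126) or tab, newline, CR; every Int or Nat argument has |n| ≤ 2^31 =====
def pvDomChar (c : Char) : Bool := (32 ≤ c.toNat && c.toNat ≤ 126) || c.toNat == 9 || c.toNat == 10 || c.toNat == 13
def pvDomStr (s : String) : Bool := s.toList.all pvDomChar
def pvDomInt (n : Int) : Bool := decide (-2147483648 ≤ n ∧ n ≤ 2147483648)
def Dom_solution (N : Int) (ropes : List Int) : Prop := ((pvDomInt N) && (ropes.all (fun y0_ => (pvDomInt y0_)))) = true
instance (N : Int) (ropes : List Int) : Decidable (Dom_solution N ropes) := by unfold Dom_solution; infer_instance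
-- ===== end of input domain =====

-- B replaces A's sort + positional pass by per-rope counting of heavier ropes; return values agree on 1 ≤ N ≤ len(ropes).

-- ===== PORT A =====
def solution (N : Int) (ropes : List Int) : Int :=
  let ascendingRopes := PySem.List.sorted ropes (fun x => x) true
  let result := (PySem.List.pyRange 0 N).foldl
    (fun acc i => acc ++ [((PySem.List.pyGet? ascendingRopes i).getD 0) * (i + 1)]) []
  (PySem.List.max? result (fun y => y)).getD 0

-- ===== PORT B =====
def altStep (N : Int) (ropes : List Int) (best : Option Int) (r : Int) : Option Int :=
  let p := ropes.foldl
    (fun p x => ((if r < x then p.1 + 1 else p.1), (if r ≤ x then p.2 + 1 else p.2)))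
    ((0 : Int), (0 : Int))
  let k1 := min (p.1 + 1) N
  let k2 := min p.2 N
  let cand := max (r * k1) (r * k2)
  match best with
  | none => some cand
  | some b => if b < cand then some cand else some b

def solution_alt (N : Int) (ropes : List Int) : Int :=
  -- Python B raises ValueError outside 1 ≤ N ≤ len(ropes); the port returns 0 there (outside Pre_)
  if 1 ≤ N ∧ N ≤ ropes.length then (ropes.foldl (altStep N ropes) none).getD 0 else 0

-- ===== PRECONDITION & SPEC =====
-- Pre_: exactly the inputs where A returns normally (N > len(ropes) raises IndexError; N ≤ 0 raises ValueError on max([])).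
def Pre_solution (N : Int) (ropes : List Int) : Prop := 1 ≤ N ∧ N ≤ ropes.length
instance (N : Int) (ropes : List Int) : Decidable (Pre_solution N ropes) := by unfold Pre_solution; infer_instance
def pvWitness_solution : Int × List Int := (2, [3, 1, 4])

def Spec_solution (N : Int) (ropes : List Int) (out : Int) : Prop := out = solution_alt N ropes
instance (N : Int) (ropes : List Int) (out : Int) : Decidable (Spec_solution N ropes out) := by unfold Spec_solution; infer_instance

-- ===== CLAIM (what is proved, stated in full; the proofs are below) =====
def Claim_equal_solution : Prop := ∀ (N : Int) (ropes : List Int), Dom_solution N ropes → Pre_solution N ropes → Spec_solution N ropes (solution N ropes)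

-- ===== LEMMAS AND PROOFS =====

-- the per-rope candidate B's loop body computes
def candF (N : Int) (ropes : List Int) (r : Int) : Int :=
  max (r * min (((ropes.countP fun x => decide (r < x)) : Int) + 1) N)
      (r * min ((ropes.countP fun x => decide (r ≤ x)) : Int) N)

lemma altStep_eq (N : Int) (ropes : List Int) (best : Option Int) (r : Int) :
    altStep N ropes best r =
      match best with
      | none => some (candF N ropes r)
      | some b => some (max b (candF N ropes r)) := by
  unfold altStep candF
  rw [PySem.List.foldl_prod_mk (f := fun acc x => if r < x then acc + 1 else acc)
        (g := fun acc x => if r ≤ x then acc + 1 else acc)]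
  rw [PySem.List.foldl_ite_add_one, PySem.List.foldl_ite_add_one]
  cases best with
  | none => simp
  | some b =>
    simp only [zero_add]
    split_ifs with h
    · simp [max_eq_right h.le]
    · simp [max_eq_left (not_lt.mp h)]

lemma foldl_optmax (F : Int → Int) (t : List Int) (b : Int) (step : Option Int → Int → Option Int)
    (hstep : ∀ o r, step o r = match o with
      | none => some (F r)
      | some b => some (max b (F r))) :
    t.foldl step (some b) = some ((t.map F).foldl max b) := by
  induction t generalizing b with
  | nil => simp
  | cons x t ih =>
    simp only [List.foldl_cons, List.map_cons, hstep]
    exact ih (max b (F x))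

lemma foldl_optmax_none (F : Int → Int) (r0 : Int) (t0 : List Int)
    (step : Option Int → Int → Option Int)
    (hstep : ∀ o r, step o r = match o with
      | none => some (F r)
      | some b => some (max b (F r))) :
    (r0 :: t0).foldl step none = some ((t0.map F).foldl max (F r0)) := by
  simp only [List.foldl_cons, hstep]
  exact foldl_optmax F t0 (F r0) step hstep

-- descending sortedness of Python's sorted(..., reverse=True) with identity key
lemma insertBy_desc (x : Int) (ys : List Int) (h : ys.Pairwise (· ≥ ·)) :
    (PySem.List.insertBy (fun a b => decide (b < a)) x ys).Pairwise (· ≥ ·) := by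
  induction ys with
  | nil => simp [PySem.List.insertBy]
  | cons y ys ih =>
    rw [List.pairwise_cons] at h
    by_cases hxy : y < x
    · have heq : PySem.List.insertBy (fun a b => decide (b < a)) x (y :: ys) = x :: y :: ys := by
        simp [PySem.List.insertBy, hxy]
      rw [heq, List.pairwise_cons]
      refine ⟨?_, List.pairwise_cons.mpr h⟩
      intro z hz
      rcases List.mem_cons.mp hz with rfl | hz'
      · exact hxy.le
      · exact le_trans (h.1 z hz') hxy.le
    · have heq : PySem.List.insertBy (fun a b => decide (b < a)) x (y :: ys)
          = y :: PySem.List.insertBy (fun a b => decide (b < a)) x ys := by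
        simp [PySem.List.insertBy, hxy]
      rw [heq, List.pairwise_cons]
      refine ⟨?_, ih h.2⟩
      intro z hz
      rcases (PySem.List.mem_insertBy _ _ _ _).mp hz with rfl | hz'
      · exact not_lt.mp hxy
      · exact h.1 z hz'

lemma sorted_rev_desc (ropes : List Int) :
    (PySem.List.sorted ropes (fun x => x) true).Pairwise (· ≥ ·) := by
  rw [PySem.List.sorted_rev_eq_foldl_insertBy]
  have haux : ∀ (l acc : List Int), acc.Pairwise (· ≥ ·) →
      (l.foldl (fun acc x => PySem.List.insertBy (fun a b => decide (b < a)) x acc) acc).Pairwise (· ≥ ·) := by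
    intro l
    induction l with
    | nil => exact fun acc h => h
    | cons x l ih =>
      intro acc h
      exact ih _ (insertBy_desc x acc h)
  exact haux ropes [] (by simp)

-- counting in a descending list: a position where the (upward-closed) predicate fails bounds the count
lemma countP_le_of_not (s : List Int) (hs : s.Pairwise (· ≥ ·)) (p : Int → Bool)
    (hp : ∀ a b : Int, b ≤ a → p b = true → p a = true)
    (i : Nat) (hi : i < s.length) (hpi : p s[i] = false) : s.countP p ≤ i := by
  have hsplit : s.countP p = (s.take i).countP p + (s.drop i).countP p := by
    conv_lhs => rw [← List.take_append_drop i s]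
    exact List.countP_append
  have hdrop : (s.drop i).countP p = 0 := by
    rw [List.countP_eq_zero]
    intro a ha
    obtain ⟨k, hk, hka⟩ := List.getElem_of_mem ha
    have hik : i + k < s.length := by
      have := hk; simp [List.length_drop] at this; omega
    have hle : s[i + k] ≤ s[i] := by
      rcases Nat.eq_zero_or_pos k with rfl | hkpos
      · simp
      · exact List.pairwise_iff_getElem.mp hs i (i + k) hi hik (by omega)
    intro hpa
    have : p s[i] = true := hp _ _ hle (by rw [← hka] at hpa; rwa [List.getElem_drop] at hpa)
    simp [this] at hpi
  have h1 : (s.take i).countP p ≤ (s.take i).length := List.countP_le_length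
  have h2 : (s.take i).length ≤ i := by simp [List.length_take]
  omega

lemma countP_prefix (s : List Int) (hs : s.Pairwise (· ≥ ·)) (p : Int → Bool)
    (hp : ∀ a b : Int, b ≤ a → p b = true → p a = true)
    (i : Nat) (hi : i < s.length) (hcnt : i < s.countP p) : p s[i] = true := by
  cases hb : p s[i] with
  | true => rfl
  | false =>
    have := countP_le_of_not s hs p hp i hi hb
    omega

lemma mul_mem_interval_le (r k a b : Int) (ha : a ≤ k) (hb : k ≤ b) :
    r * k ≤ max (r * a) (r * b) := by
  rcases le_total 0 r with hr | hr
  · exact le_max_of_le_right (mul_le_mul_of_nonneg_left hb hr)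
  · exact le_max_of_le_left (mul_le_mul_of_nonpos_left ha hr)

-- ===== VERDICT (by name: the statement is the Claim_ definition above) =====
theorem solution_spec : Claim_equal_solution := by
  intro N ropes _hdom hpre
  obtain ⟨hN1, hN2⟩ := hpre
  unfold Spec_solution
  set s := PySem.List.sorted ropes (fun x => x) true with hs_def
  have hperm : s.Perm ropes := PySem.List.sorted_perm ropes (fun x => x) true
  have hlen : s.length = ropes.length := hperm.length_eq
  have hlen' : (s.length : Int) = (ropes.length : Int) := by exact_mod_cast hlen
  have hdesc : s.Pairwise (· ≥ ·) := sorted_rev_desc ropes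
  set n := N.toNat with hn_def
  have hNn : N = (n : Int) := by omega
  have hn1 : 1 ≤ n := by omega
  have hnle : n ≤ s.length := by omega
  set g : Nat → Int := fun k => s.getD k 0 * ((k : Int) + 1) with hg_def
  -- A's normal form
  have hAres : solution N ropes
      = (PySem.List.max? ((List.range n).map g) (fun y => y)).getD 0 := by
    have h1 : solution N ropes
        = (PySem.List.max? ((PySem.List.pyRange 0 N).foldl
            (fun acc i => acc ++ [((PySem.List.pyGet? s i).getD 0) * (i + 1)]) [])
            (fun y => y)).getD 0 := rfl
    rw [h1, hNn, PySem.List.pyRange_zero_natCast,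
        PySem.List.foldl_append_singleton_eq_map, List.nil_append, List.map_map]
    congr 1
    congr 1
    apply List.map_congr_left
    intro k hk
    have hkn : k < n := List.mem_range.mp hk
    have hks : k < s.length := lt_of_lt_of_le hkn hnle
    simp only [Function.comp, hg_def]
    rw [PySem.List.pyGet?_natCast, ← List.getD_eq_getElem?_getD]
  obtain ⟨x, t, hxt⟩ : ∃ x t, (List.range n).map g = x :: t := by
    cases hc : (List.range n).map g with
    | nil =>
      exfalso
      have := congrArg List.length hc
      simp [List.length_map, List.length_range] at this
      omega
    | cons x t => exact ⟨x, t, rfl⟩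
  have hAmax : solution N ropes = t.foldl max x := by
    rw [hAres, hxt, PySem.List.max?_id_cons]; rfl
  have hAmem : ∃ k < n, solution N ropes = g k := by
    have hmem : solution N ropes ∈ (List.range n).map g := by
      rw [hxt, hAmax]
      rcases PySem.List.foldl_max_mem t x with h | h
      · rw [h]; exact List.mem_cons_self
      · exact List.mem_cons_of_mem _ h
    obtain ⟨k, hk, hgk⟩ := List.mem_map.mp hmem
    exact ⟨k, List.mem_range.mp hk, hgk.symm⟩
  have hAub : ∀ k, k < n → g k ≤ solution N ropes := by
    intro k hk
    have hmem : g k ∈ x :: t := by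
      rw [← hxt]
      exact List.mem_map.mpr ⟨k, List.mem_range.mpr hk, rfl⟩
    rw [hAmax]
    rcases List.mem_cons.mp hmem with h | h
    · rw [h]; exact (PySem.List.le_foldl_max t x).1
    · exact (PySem.List.le_foldl_max t x).2 _ h
  -- B's normal form
  obtain ⟨r0, t0, hrt⟩ : ∃ r0 t0, ropes = r0 :: t0 := by
    cases ropes with
    | nil => exfalso; simp at hN2; omega
    | cons r0 t0 => exact ⟨r0, t0, rfl⟩
  have hBfold := foldl_optmax_none (candF N ropes) r0 t0 (altStep N ropes) (altStep_eq N ropes)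
  rw [← hrt] at hBfold
  have hBmax : solution_alt N ropes = (t0.map (candF N ropes)).foldl max (candF N ropes r0) := by
    unfold solution_alt
    rw [if_pos ⟨hN1, hN2⟩, hBfold]; rfl
  have hBmem : ∃ r ∈ ropes, solution_alt N ropes = candF N ropes r := by
    rw [hBmax]
    rcases PySem.List.foldl_max_mem (t0.map (candF N ropes)) (candF N ropes r0) with h | h
    · exact ⟨r0, by rw [hrt]; exact List.mem_cons_self, h⟩
    · obtain ⟨r, hr, hcr⟩ := List.mem_map.mp h
      exact ⟨r, by rw [hrt]; exact List.mem_cons_of_mem _ hr, hcr.symm⟩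
  have hBub : ∀ r ∈ ropes, candF N ropes r ≤ solution_alt N ropes := by
    intro r hr
    rw [hBmax]
    rcases List.mem_cons.mp (hrt ▸ hr) with rfl | h
    · exact (PySem.List.le_foldl_max _ _).1
    · exact (PySem.List.le_foldl_max _ _).2 _ (List.mem_map.mpr ⟨r, h, rfl⟩)
  -- counts transfer from ropes to s
  have hcntP : ∀ p : Int → Bool, ropes.countP p = s.countP p :=
    fun p => (List.Perm.countP_eq p hperm).symm
  have hup_lt : ∀ r : Int, ∀ a b : Int, b ≤ a → decide (r < b) = true → decide (r < a) = true := by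
    intro r a b hba h; simp at h ⊢; omega
  have hup_le : ∀ r : Int, ∀ a b : Int, b ≤ a → decide (r ≤ b) = true → decide (r ≤ a) = true := by
    intro r a b hba h; simp at h ⊢; omega
  -- (i) each A-candidate is at most B's candidate for that rope
  have key1 : ∀ k, k < n → g k ≤ candF N ropes (s.getD k 0) := by
    intro k hk
    have hks : k < s.length := lt_of_lt_of_le hk hnle
    have hgd : s.getD k 0 = s[k] := List.getD_eq_getElem s 0 hks
    set r := s[k] with hr_def
    have hgt : s.countP (fun x => decide (r < x)) ≤ k :=
      countP_le_of_not s hdesc _ (hup_lt r) k hks (by simp [hr_def])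
    have hge : k + 1 ≤ s.countP (fun x => decide (r ≤ x)) := by
      have htake : (s.take (k + 1)).countP (fun x => decide (r ≤ x)) = (s.take (k + 1)).length := by
        rw [List.countP_eq_length]
        intro a ha
        obtain ⟨j, hj, hja⟩ := List.getElem_of_mem ha
        have hjk : j ≤ k := by
          have := hj; simp [List.length_take] at this; omega
        have hjs : j < s.length := by omega
        have hsa : (s.take (k+1))[j] = s[j] := List.getElem_take
        have hle : r ≤ s[j] := by
          rcases Nat.lt_or_ge j k with h | h
          · exact List.pairwise_iff_getElem.mp hdesc j k hjs hks h
          · have : j = k := by omega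
            subst this; exact le_refl _
        simp [← hja, hsa]
        omega
      have hlt : (s.take (k + 1)).length = k + 1 := by
        simp [List.length_take]; omega
      calc k + 1 = (s.take (k + 1)).countP (fun x => decide (r ≤ x)) := by rw [htake, hlt]
        _ ≤ s.countP (fun x => decide (r ≤ x)) := (List.take_sublist _ _).countP_le
    unfold candF
    rw [hcntP, hcntP, hgd]
    have hgk : g k = r * ((k : Int) + 1) := by simp only [hg_def, hgd]
    rw [hgk]
    apply mul_mem_interval_le
    · have : ((s.countP fun x => decide (r < x) : Nat) : Int) ≤ (k : Int) := by exact_mod_cast hgt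
      omega
    · have : ((k : Int) + 1) ≤ ((s.countP fun x => decide (r ≤ x) : Nat) : Int) := by exact_mod_cast hge
      omega
  -- (ii) each B-candidate is at most A's result
  have key2 : ∀ r ∈ ropes, candF N ropes r ≤ solution N ropes := by
    intro r hr
    have hrs : r ∈ s := hperm.mem_iff.mpr hr
    have hgtge : s.countP (fun x => decide (r < x)) < s.countP (fun x => decide (r ≤ x)) := by
      obtain ⟨u, v, huv⟩ := List.append_of_mem hrs
      rw [huv, List.countP_append, List.countP_append, List.countP_cons, List.countP_cons]
      simp only [decide_eq_true_eq]
      have h1 : u.countP (fun x => decide (r < x)) ≤ u.countP (fun x => decide (r ≤ x)) :=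
        List.countP_mono_left (by intro a _ h; simp at h ⊢; omega)
      have h2 : v.countP (fun x => decide (r < x)) ≤ v.countP (fun x => decide (r ≤ x)) :=
        List.countP_mono_left (by intro a _ h; simp at h ⊢; omega)
      simp
      omega
    set ge := s.countP (fun x => decide (r ≤ x)) with hge_def
    have hgele : ge ≤ s.length := List.countP_le_length
    have hone : ∀ K : Int, 1 ≤ K → K ≤ N → K - 1 < (ge : Int) → r * K ≤ solution N ropes := by
      intro K hK1 hKN hKge
      set j := (K - 1).toNat with hj_def
      have hjn : j < n := by omega
      have hjlen : j < s.length := by omega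
      have hjge : j < ge := by omega
      have hle : r ≤ s[j] := by
        have := countP_prefix s hdesc (fun x => decide (r ≤ x)) (hup_le r) j hjlen hjge
        simpa using this
      have hKj : K = (j : Int) + 1 := by omega
      calc r * K ≤ s[j] * K := mul_le_mul_of_nonneg_right hle (by omega)
        _ = g j := by rw [hKj]; simp only [hg_def]; rw [List.getD_eq_getElem s 0 hjlen]
        _ ≤ solution N ropes := hAub j hjn
    unfold candF
    rw [hcntP, hcntP]
    apply max_le
    · apply hone
      · have : (0 : Int) ≤ (s.countP fun x => decide (r < x) : Nat) := by positivity
        omega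
      · exact min_le_right _ _
      · have : ((s.countP fun x => decide (r < x) : Nat) : Int) < ((ge : Nat) : Int) := by
          exact_mod_cast hgtge
        omega
    · apply hone
      · have : (0 : Nat) < ge := by omega
        have : (1 : Int) ≤ ((ge : Nat) : Int) := by exact_mod_cast this
        omega
      · exact min_le_right _ _
      · omega
  -- conclude by antisymmetry
  obtain ⟨k, hkn, hAeq⟩ := hAmem
  obtain ⟨r1, hr1, hBeq⟩ := hBmem
  have h1 : solution N ropes ≤ solution_alt N ropes := by
    rw [hAeq]
    have hks : k < s.length := lt_of_lt_of_le hkn hnle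
    have hmem : s.getD k 0 ∈ ropes := by
      rw [List.getD_eq_getElem s 0 hks]
      exact hperm.mem_iff.mp (List.getElem_mem hks)
    exact le_trans (key1 k hkn) (hBub _ hmem)
  have h2 : solution_alt N ropes ≤ solution N ropes := by
    rw [hBeq]; exact key2 r1 hr1
  omega
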